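-- pv_equiv track=rewrite | github.com/ITlearning/Algorithm_Solved | Python/Programmers/Lv1_Problem/Lv1_폰켓몬.py | solution
-- ===== SOURCE A (Python) =====
-- def solution(nums):
--     #answer = 0
--     board = []
--     result = len(nums)//2
--     for i in nums:
--         if i not in board:
--             board.append(i)
--
--     if len(board) > result:
--         return result
--     else:
--         return len(board)
-- ===== SOURCE B (Python) =====
-- def solution(nums):
--     s = sorted(nums)
--     d = 0
--     prev = None
--     for x in s:
--         if prev is None or x != prev:
--             d += 1
--         prev = x
--     return min(d, len(nums) // 2)
-- ===== Notes on version B (the rewrite author's own statement) =====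
-- stated objective: faster
-- what changed: Replaces the O(n^2) membership-based dedup list with sort + one adjacent-comparison pass counting distinct values, then min with n//2.
import Mathlib
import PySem

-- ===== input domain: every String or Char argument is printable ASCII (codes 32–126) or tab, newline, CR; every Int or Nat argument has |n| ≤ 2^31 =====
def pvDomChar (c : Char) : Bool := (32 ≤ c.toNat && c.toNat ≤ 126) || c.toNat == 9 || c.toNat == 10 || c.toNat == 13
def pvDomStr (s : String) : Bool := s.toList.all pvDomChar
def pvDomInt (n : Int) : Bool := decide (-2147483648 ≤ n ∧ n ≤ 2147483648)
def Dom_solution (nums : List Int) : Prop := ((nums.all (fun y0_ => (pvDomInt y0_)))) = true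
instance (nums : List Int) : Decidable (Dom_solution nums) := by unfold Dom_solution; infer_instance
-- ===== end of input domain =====

-- B replaces A's quadratic membership-test dedup with sort + one adjacent-comparison pass (objective: faster).

-- ===== PORT A =====
def solution (nums : List Int) : Int :=
  let board : List Int := nums.foldl (fun b i => if i ∈ b then b else b ++ [i]) []
  let result : Int := PySem.Int.floordiv (nums.length : Int) 2
  if (board.length : Int) > result then result else (board.length : Int)

-- ===== PORT B =====
-- the loop body of Source B: state (d, prev)
def bStep (acc : Int × Option Int) (x : Int) : Int × Option Int :=
  (if acc.2 = none ∨ ¬ acc.2 = some x then acc.1 + 1 else acc.1, some x)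

def solution_alt (nums : List Int) : Int :=
  let s := PySem.List.sorted nums (fun x => x) false
  let dp := s.foldl bStep (0, none)
  min dp.1 (PySem.Int.floordiv (nums.length : Int) 2)

-- ===== PRECONDITION & SPEC =====
def Spec_solution (nums : List Int) (out : Int) : Prop := out = solution_alt nums
instance (nums : List Int) (out : Int) : Decidable (Spec_solution nums out) := by unfold Spec_solution; infer_instance

-- ===== CLAIM (what is proved, stated in full; the proofs are below) =====
def Claim_equal_solution : Prop := ∀ (nums : List Int), Dom_solution nums → Spec_solution nums (solution nums)

-- ===== LEMMAS AND PROOFS =====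

-- card of insert in terms of erase (holds whether or not x is already present)
theorem card_insert_erase (x : Int) (t : Finset Int) :
    (insert x t).card = (t.erase x).card + 1 := by
  by_cases h : x ∈ t
  · rw [Finset.insert_eq_self.mpr h, Finset.card_erase_add_one h]
  · rw [Finset.card_insert_of_notMem h, Finset.erase_eq_of_notMem h]

-- A's dedup loop: the accumulated board stays duplicate-free and collects exactly the elements seen
theorem board_inv (nums : List Int) : ∀ b : List Int, b.Nodup →
    (nums.foldl (fun b i => if i ∈ b then b else b ++ [i]) b).Nodup ∧
    (nums.foldl (fun b i => if i ∈ b then b else b ++ [i]) b).toFinset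
      = b.toFinset ∪ nums.toFinset := by
  induction nums with
  | nil => intro b hb; simpa using hb
  | cons i t ih =>
    intro b hb
    simp only [List.foldl_cons]
    by_cases hmem : i ∈ b
    · simp only [if_pos hmem]
      obtain ⟨h1, h2⟩ := ih b hb
      refine ⟨h1, ?_⟩
      rw [h2]
      ext x
      simp only [Finset.mem_union, List.mem_toFinset, List.toFinset_cons, Finset.mem_insert]
      constructor
      · tauto
      · rintro (h | rfl | h) <;> tauto
    · simp only [if_neg hmem]
      have hb' : (b ++ [i]).Nodup := by
        rw [List.nodup_append]
        exact ⟨hb, List.nodup_singleton i, fun a ha c hc => by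
          simp only [List.mem_singleton] at hc; subst hc; rintro rfl; exact hmem ha⟩
      obtain ⟨h1, h2⟩ := ih (b ++ [i]) hb'
      refine ⟨h1, ?_⟩
      rw [h2]
      ext x
      simp only [Finset.mem_union, List.mem_toFinset, List.mem_append, List.mem_singleton,
        List.toFinset_cons, Finset.mem_insert]
      tauto

-- B's pass, after the first element: counting changes on a sorted tail with minimal prev p
theorem count_aux (l : List Int) (hl : l.Pairwise (· ≤ ·)) :
    ∀ p : Int, (∀ y ∈ l, p ≤ y) → ∀ d : Int,
    (l.foldl bStep (d, some p)).1 = d + ((l.toFinset.erase p).card : Int) := by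
  induction l with
  | nil => intro p _ d; simp
  | cons x xs ih =>
    intro p hp d
    have hxxs : ∀ y ∈ xs, x ≤ y := fun y hy => (List.pairwise_cons.mp hl).1 y hy
    have htail := ih (List.pairwise_cons.mp hl).2 x hxxs
    simp only [List.foldl_cons]
    by_cases hpx : p = x
    · subst hpx
      have : bStep (d, some p) p = (d, some p) := by simp [bStep]
      rw [this, htail d]
      congr 2
      rw [List.toFinset_cons, Finset.erase_insert_eq_erase]
    · have : bStep (d, some p) x = (d + 1, some x) := by
        simp [bStep]; exact hpx
      rw [this, htail (d + 1)]
      have hplt : ∀ y ∈ (x :: xs), p < y := by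
        intro y hy
        rcases List.mem_cons.mp hy with rfl | hy'
        · exact lt_of_le_of_ne (hp y hy) hpx
        · exact lt_of_lt_of_le (lt_of_le_of_ne (hp x (by simp)) hpx) (hxxs y hy')
      have hpnot : p ∉ (x :: xs).toFinset := by
        intro hmem
        exact absurd rfl (ne_of_lt (hplt p (List.mem_toFinset.mp hmem)))
      rw [Finset.erase_eq_of_notMem hpnot]
      have hcard : (x :: xs).toFinset.card = (xs.toFinset.erase x).card + 1 := by
        rw [List.toFinset_cons, card_insert_erase]
      rw [hcard]
      push_cast
      ring

-- B's full pass on a sorted list counts the distinct elements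
theorem count_sorted (l : List Int) (hl : l.Pairwise (· ≤ ·)) :
    (l.foldl bStep (0, none)).1 = (l.toFinset.card : Int) := by
  cases l with
  | nil => simp
  | cons x xs =>
    have hxxs : ∀ y ∈ xs, x ≤ y := fun y hy => (List.pairwise_cons.mp hl).1 y hy
    simp only [List.foldl_cons]
    have h1 : bStep (0, none) x = (1, some x) := by simp [bStep]
    rw [h1, count_aux xs (List.pairwise_cons.mp hl).2 x hxxs 1]
    have hcard : (x :: xs).toFinset.card = (xs.toFinset.erase x).card + 1 := by
      rw [List.toFinset_cons, card_insert_erase]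
    rw [hcard]
    push_cast
    ring

-- ===== VERDICT (by name: the statement is the Claim_ definition above) =====
theorem solution_spec : Claim_equal_solution := by
  intro nums _
  unfold Spec_solution solution solution_alt
  dsimp only
  obtain ⟨hnd, hts⟩ := board_inv nums [] List.nodup_nil
  set board := nums.foldl (fun b i => if i ∈ b then b else b ++ [i]) [] with hb
  have hlen : board.length = nums.toFinset.card := by
    rw [← List.toFinset_card_of_nodup hnd, hts]; simp
  set s := PySem.List.sorted nums (fun x => x) false with hs
  have hsp : s.Pairwise (· ≤ ·) := by
    simpa using PySem.List.sorted_pairwise nums (fun x => x)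
  have hperm : s.Perm nums := PySem.List.sorted_perm nums (fun x => x) false
  have hsfin : s.toFinset = nums.toFinset := by
    ext x; simp [List.mem_toFinset, hperm.mem_iff]
  have hd : (s.foldl bStep (0, none)).1 = (board.length : Int) := by
    rw [count_sorted s hsp, hsfin, hlen]
  rw [hd]
  set r : Int := PySem.Int.floordiv (nums.length : Int) 2
  simp only [min_def]
  split_ifs <;> omega
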